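-- pv_equiv track=rewrite | github.com/Vyary/SoftUni | python-fundamentals-course/text-processing/winning_ticket.py | winning_counter
-- ===== SOURCE A (Python) =====
-- def counter(searched_symbol: str, string: str) -> int:
--     count = 0
--     streak = 0
--
--     for char in string:
--         if char == searched_symbol:
--             count += 1
--             if count > streak:
--                 streak = count
--         else:
--             if count > streak:
--                 streak = count
--             count = 0
--
--     return streak
--
-- def winning_counter(ticket: str) -> [int, str]:
--     winning_symbols = ['$', '#', '@', '^']
--     left_part = ticket[:10]
--     right_part = ticket[10:]
--     min_side = 0
--     winning_symbol = ''
--     for symbol in winning_symbols: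
--         left_count = counter(symbol, left_part)
--         right_count = counter(symbol, right_part)
--         symbol_count = min(left_count, right_count)
--
--         if symbol_count > min_side:
--             min_side = symbol_count
--             winning_symbol = symbol
--
--     return min_side, winning_symbol
-- ===== SOURCE B (Python) =====
-- def _max_runs(string):
--     # one pass: run-length table, char -> longest consecutive run
--     table = {}
--     i = 0
--     n = len(string)
--     while i < n:
--         j = i
--         while j < n and string[j] == string[i]:
--             j += 1
--         run = j - i
--         if run > table.get(string[i], 0):
--             table[string[i]] = run
--         i = j
--     return table
--
--
-- def winning_counter(ticket: str) -> [int, str]: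
--     left = _max_runs(ticket[:10])
--     right = _max_runs(ticket[10:])
--     min_side = 0
--     winning_symbol = ''
--     for symbol in ['$', '#', '@', '^']:
--         symbol_count = min(left.get(symbol, 0), right.get(symbol, 0))
--         if symbol_count > min_side:
--             min_side = symbol_count
--             winning_symbol = symbol
--     return min_side, winning_symbol
-- ===== Notes on version B (the rewrite author's own statement) =====
-- stated objective: alternative
-- what changed: Instead of scanning each half once per winning symbol (8 streak scans), B makes one run-length pass per half building a char->longest-run table, then picks the best symbol from the two tables.
import Mathlib
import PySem

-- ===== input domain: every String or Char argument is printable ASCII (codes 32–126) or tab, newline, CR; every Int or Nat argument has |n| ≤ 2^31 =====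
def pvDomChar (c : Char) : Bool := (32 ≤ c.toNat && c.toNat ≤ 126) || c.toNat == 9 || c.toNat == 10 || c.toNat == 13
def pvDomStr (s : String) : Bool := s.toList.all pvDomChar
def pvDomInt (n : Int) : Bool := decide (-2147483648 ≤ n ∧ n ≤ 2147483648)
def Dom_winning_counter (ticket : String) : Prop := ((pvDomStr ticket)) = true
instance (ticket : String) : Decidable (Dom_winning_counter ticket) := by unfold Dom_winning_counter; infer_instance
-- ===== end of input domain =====

-- B replaces A's per-symbol streak scans (8 passes) by one run-length table per half
-- plus a single pass over the symbols (objective: alternative decomposition).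

-- ===== PORT A =====
-- counter: per-char loop with (count, streak) state, literal branches of A
def counterStep (sym : Char) (cs : Int × Int) (ch : Char) : Int × Int :=
  if ch = sym then
    let count := cs.1 + 1
    if count > cs.2 then (count, count) else (count, cs.2)
  else
    if cs.1 > cs.2 then (0, cs.1) else (0, cs.2)

def counterA (sym : Char) (s : List Char) : Int :=
  (s.foldl (counterStep sym) (0, 0)).2

def winning_counter (ticket : String) : Int × String :=
  let left_part := PySem.List.slice ticket.toList none (some 10)
  let right_part := PySem.List.slice ticket.toList (some 10) none
  let r := [('$' : Char), '#', '@', '^'].foldl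
    (fun (st : Int × String) sym =>
      let left_count := counterA sym left_part
      let right_count := counterA sym right_part
      let symbol_count := min left_count right_count
      if symbol_count > st.1 then (symbol_count, String.ofList [sym]) else st)
    (0, "")
  r

-- ===== PORT B =====
-- one run-length pass: char -> longest consecutive run (Source B's _max_runs while loop)
def maxRunsLoop (s : List Char) (d : PySem.Dict Char Int) : PySem.Dict Char Int :=
  match s with
  | [] => d
  | c :: rest =>
      let run : Int := 1 + (rest.takeWhile (· = c)).length
      let rest' := rest.dropWhile (· = c)
      let d' := if run > d.getD c 0 then d.insert c run else d
      maxRunsLoop rest' d'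
termination_by s.length
decreasing_by
  have := List.length_dropWhile_le (fun x => decide (x = c)) rest
  simp only [List.length_cons]; omega

def winning_counter_alt (ticket : String) : Int × String :=
  let left := maxRunsLoop (PySem.List.slice ticket.toList none (some 10)) PySem.Dict.empty
  let right := maxRunsLoop (PySem.List.slice ticket.toList (some 10) none) PySem.Dict.empty
  [('$' : Char), '#', '@', '^'].foldl
    (fun (st : Int × String) sym =>
      let symbol_count := min (left.getD sym 0) (right.getD sym 0)
      if symbol_count > st.1 then (symbol_count, String.ofList [sym]) else st)
    (0, "")

-- ===== PRECONDITION & SPEC =====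
def Spec_winning_counter (ticket : String) (out : Int × String) : Prop := out = winning_counter_alt ticket
instance (ticket : String) (out : Int × String) : Decidable (Spec_winning_counter ticket out) := by unfold Spec_winning_counter; infer_instance

-- ===== CLAIM (what is proved, stated in full; the proofs are below) =====
def Claim_equal_winning_counter : Prop := ∀ (ticket : String), Dom_winning_counter ticket → Spec_winning_counter ticket (winning_counter ticket)

-- ===== LEMMAS AND PROOFS =====

-- streak is monotone in the initial streak value (hence ≥ its start)
theorem counter_le_foldl (c : Char) : ∀ (s : List Char) (k m : Int),
    m ≤ (s.foldl (counterStep c) (k, m)).2 := by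
  intro s
  induction s with
  | nil => intro k m; simp
  | cons x s ih =>
    intro k m
    simp only [List.foldl, counterStep]
    split_ifs with h1 h2 h3
    · exact le_trans (by omega) (ih (k + 1) (k + 1))
    · exact ih (k + 1) m
    · exact le_trans (by omega) (ih 0 k)
    · exact ih 0 m

-- the streak starting value factors out as a max (0 ≤ k, 0 ≤ m)
theorem counter_shift (c : Char) : ∀ (s : List Char) (k m : Int), 0 ≤ k → 0 ≤ m →
    (s.foldl (counterStep c) (k, m)).2 = max m (s.foldl (counterStep c) (k, 0)).2 := by
  intro s
  induction s with
  | nil => intro k m hk hm; simp; omega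
  | cons x s ih =>
    intro k m hk hm
    simp only [List.foldl, counterStep]
    by_cases hx : x = c
    · rw [if_pos hx, if_pos hx, if_pos (by omega : k + 1 > 0)]
      by_cases h2 : k + 1 > m
      · rw [if_pos h2]
        have := counter_le_foldl c s (k + 1) (k + 1)
        omega
      · rw [if_neg h2, ih (k + 1) m (by omega) hm, ih (k + 1) (k + 1) (by omega) (by omega)]
        omega
    · rw [if_neg hx, if_neg hx]
      by_cases h2 : k > m
      · rw [if_pos h2, if_pos (by omega : k > 0)]
        have := counter_le_foldl c s 0 k
        omega
      · rw [if_neg h2]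
        by_cases h3 : k > 0
        · rw [if_pos h3, ih 0 m le_rfl hm, ih 0 k le_rfl (by omega)]
          omega
        · rw [if_neg h3, ih 0 m le_rfl hm]

-- folding over a block of chars equal to c advances count by its length
theorem counter_run (c : Char) : ∀ (u : List Char) (k m : Int), (∀ y ∈ u, y = c) →
    0 ≤ k → k ≤ m →
    u.foldl (counterStep c) (k, m) = (k + u.length, max m (k + u.length)) := by
  intro u
  induction u with
  | nil => intro k m _ _ hkm; simp; omega
  | cons y u ih =>
    intro k m hu hk hkm
    have hy : y = c := hu y (by simp)
    have hall : ∀ z ∈ u, z = c := fun z hz => hu z (by simp [hz])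
    simp only [List.foldl, counterStep, if_pos hy]
    by_cases h2 : k + 1 > m
    · rw [if_pos h2, ih (k + 1) (k + 1) hall (by omega) le_rfl, Prod.ext_iff]
      constructor <;> · simp; omega
    · rw [if_neg h2, ih (k + 1) m hall (by omega) (by omega), Prod.ext_iff]
      constructor <;> · simp; omega

-- folding over chars ≠ c from (0,0) does nothing
theorem counter_skip (c : Char) : ∀ (u : List Char), (∀ y ∈ u, y ≠ c) →
    u.foldl (counterStep c) ((0 : Int), (0 : Int)) = (0, 0) := by
  intro u
  induction u with
  | nil => simp
  | cons y u ih =>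
    intro hu
    simp only [List.foldl, counterStep, if_neg (hu y (by simp)), gt_iff_lt, lt_irrefl,
      if_false]
    exact ih fun z hz => hu z (by simp [hz])

theorem counterA_nonneg (c : Char) (s : List Char) : 0 ≤ counterA c s :=
  counter_le_foldl c s 0 0

-- head of a dropWhile fails the predicate
theorem dropWhile_head_false {α : Type} (p : α → Bool) :
    ∀ (l : List α) (y : α) (t : List α), l.dropWhile p = y :: t → p y = false := by
  intro l
  induction l with
  | nil => intro y t h; simp [List.dropWhile] at h
  | cons a l ih =>
    intro y t h
    rw [List.dropWhile] at h
    by_cases ha : p a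
    · rw [ha] at h; exact ih y t h
    · rw [Bool.not_eq_true] at ha
      rw [ha] at h
      obtain ⟨rfl, -⟩ := List.cons.inj h
      exact ha

-- main invariant: the table lookup equals A's streak counter
theorem maxRunsLoop_getD_aux : ∀ (n : Nat) (s : List Char), s.length ≤ n →
    ∀ (d : PySem.Dict Char Int), (∀ ch, 0 ≤ d.getD ch 0) → ∀ c,
    (maxRunsLoop s d).getD c 0 = max (d.getD c 0) (counterA c s) := by
  intro n
  induction n with
  | zero =>
    intro s hs d hd c
    rw [List.length_eq_zero_iff.mp (Nat.le_zero.mp hs)]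
    have h0 : counterA c ([] : List Char) = 0 := rfl
    rw [maxRunsLoop, h0]
    have := hd c
    omega
  | succ n ih =>
    intro s hs d hd c
    match s with
    | [] =>
      have h0 : counterA c ([] : List Char) = 0 := rfl
      rw [maxRunsLoop, h0]
      have := hd c
      omega
    | c0 :: rest =>
      rw [maxRunsLoop]
      set u := rest.takeWhile (· = c0) with hu
      set rest' := rest.dropWhile (· = c0) with hr
      set run : Int := 1 + u.length with hrun
      set d' := if run > d.getD c0 0 then d.insert c0 run else d with hd'
      have hrlen : rest'.length ≤ rest.length := by
        rw [hr]; exact List.length_dropWhile_le _ rest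
      have hd'nn : ∀ ch, 0 ≤ d'.getD ch 0 := by
        intro ch
        rw [hd']
        split_ifs with h
        · rw [PySem.Dict.getD_insert]
          split_ifs with h2
          · omega
          · exact hd ch
        · exact hd ch
      have hih := ih rest' (by simp at hs; omega) d' hd'nn c
      have huall : ∀ z ∈ u, z = c0 := by
        intro z hz
        rw [hu] at hz
        simpa using List.mem_takeWhile_imp hz
      have hall' : ∀ y ∈ c0 :: u, y = c0 := by
        intro y hy
        rcases List.mem_cons.mp hy with h | h
        · exact h
        · exact huall y h
      have hsplit : c0 :: rest = (c0 :: u) ++ rest' := by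
        simp [hu, hr]
      have hfold : counterA c (c0 :: rest) =
          (rest'.foldl (counterStep c) ((c0 :: u).foldl (counterStep c) (0, 0))).2 := by
        rw [counterA, hsplit, List.foldl_append]
      by_cases hc : c = c0
      · -- matching run
        subst hc
        have hstate : (c :: u).foldl (counterStep c) ((0 : Int), (0 : Int)) = (run, run) := by
          rw [counter_run c (c :: u) 0 0 hall' le_rfl le_rfl, Prod.ext_iff]
          constructor <;> (push_cast [List.length_cons]; omega)
        have hA : counterA c (c :: rest) = max run (counterA c rest') := by
          rw [hfold, hstate]
          rcases hrest' : rest' with _ | ⟨y, t⟩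
          · have h0 : counterA c ([] : List Char) = 0 := rfl
            rw [h0]
            simp only [List.foldl]
            omega
          · have hdw : List.dropWhile (fun x => decide (x = c)) rest = y :: t := by
              rw [← hr, hrest']
            have hyne : ¬ (y = c) := by
              simpa using dropWhile_head_false _ rest y t hdw
            simp only [List.foldl, counterStep, if_neg hyne]
            rw [if_neg (by omega : ¬ (run > run))]
            rw [counter_shift c t 0 run le_rfl (by omega)]
            have hcA : counterA c (y :: t) = (t.foldl (counterStep c) ((0 : Int), (0 : Int))).2 := by
              simp only [counterA, List.foldl, counterStep, if_neg hyne]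
              rw [if_neg (by omega : ¬ ((0 : Int) > 0))]
            rw [hcA]
        have hd'c : d'.getD c 0 = max (d.getD c 0) run := by
          rw [hd']
          split_ifs with h
          · rw [PySem.Dict.getD_insert, if_pos rfl]; omega
          · omega
        rw [hih, hd'c, hA]
        have := counterA_nonneg c rest'
        omega
      · -- run of a different symbol
        have hskip := counter_skip c (c0 :: u)
          (fun y hy he => hc (he.symm.trans (hall' y hy)))
        have hA : counterA c (c0 :: rest) = counterA c rest' := by
          rw [hfold, hskip]; rfl
        have hd'c : d'.getD c 0 = d.getD c 0 := by
          rw [hd']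
          split_ifs with h
          · rw [PySem.Dict.getD_insert, if_neg hc]
          · rfl
        rw [hih, hd'c, hA]

theorem maxRunsLoop_getD (s : List Char) (d : PySem.Dict Char Int)
    (hd : ∀ ch, 0 ≤ d.getD ch 0) (c : Char) :
    (maxRunsLoop s d).getD c 0 = max (d.getD c 0) (counterA c s) :=
  maxRunsLoop_getD_aux s.length s le_rfl d hd c

theorem table_getD (s : List Char) (c : Char) :
    (maxRunsLoop s PySem.Dict.empty).getD c 0 = counterA c s := by
  have h := maxRunsLoop_getD s PySem.Dict.empty (fun ch => by simp [PySem.Dict.getD_empty]) c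
  have h0 := counterA_nonneg c s
  simp [PySem.Dict.getD_empty] at h
  omega

-- ===== VERDICT (by name: the statement is the Claim_ definition above) =====
theorem winning_counter_spec : Claim_equal_winning_counter := by
  intro ticket _
  unfold Spec_winning_counter winning_counter winning_counter_alt
  simp only [List.foldl, table_getD]
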